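-- pv_equiv track=rewrite | github.com/joeltanwr/DirtyDF | ddf/ddf/stainer.py | _bin_into_group
-- ===== SOURCE A (Python) =====
-- def _bin_into_group(x, cutpoints):
--     """Helper to bin decimal into the correct group.
--
--     Parameters
--     ----------
--     x : numeric
--         value to bin into a group.
--     cutpoints : numeric list
--         the various cutpoints which define the groups.
--     """
--     #binary search for upper bound index, which is 'high'
--     low=0
--     high=len(cutpoints)-1
--     while low < high:
--         mid = low + (high - low) // 2
--         if x < cutpoints[mid]:
--             high = mid
--         else:
--             low = mid + 1
--
--     lower_bound = cutpoints[high - 1]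
--     upper_bound = cutpoints[high]
--
--     if high == len(cutpoints) - 1: #last index, closed interval
--         return f"[{lower_bound}, {upper_bound}]"
--     else: #not last index, half-open interval
--         return f"[{lower_bound}, {upper_bound})"
-- ===== SOURCE B (Python) =====
-- def _bin_into_group(x, cutpoints):
--     """Bin x into its group: linear scan for the first cutpoint exceeding x."""
--     high = len(cutpoints) - 1
--     for i in range(len(cutpoints)):
--         if x < cutpoints[i]:
--             high = i
--             break
--     lower_bound = cutpoints[high - 1]
--     upper_bound = cutpoints[high]
--     if high == len(cutpoints) - 1:
--         return f"[{lower_bound}, {upper_bound}]"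
--     return f"[{lower_bound}, {upper_bound})"
-- ===== Notes on version B (the rewrite author's own statement) =====
-- stated objective: simpler
-- what changed: Replaces the hand-written binary search over index pairs with a single linear scan that takes the first index whose cutpoint exceeds x (default last index), keeping A's exact formatting and negative-index behaviour for x below the first cutpoint; Pre_ excludes the empty list (IndexError) and inputs whose comparison pattern x < cutpoints[i] is non-monotone (cutpoints unsorted around x), where binary search probes give an accidental index.
-- outside the precondition, e.g. on _bin_into_group(2, [5, 1, 10]): A returns '[1, 10]', B returns '[10, 5)'
import Mathlib
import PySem

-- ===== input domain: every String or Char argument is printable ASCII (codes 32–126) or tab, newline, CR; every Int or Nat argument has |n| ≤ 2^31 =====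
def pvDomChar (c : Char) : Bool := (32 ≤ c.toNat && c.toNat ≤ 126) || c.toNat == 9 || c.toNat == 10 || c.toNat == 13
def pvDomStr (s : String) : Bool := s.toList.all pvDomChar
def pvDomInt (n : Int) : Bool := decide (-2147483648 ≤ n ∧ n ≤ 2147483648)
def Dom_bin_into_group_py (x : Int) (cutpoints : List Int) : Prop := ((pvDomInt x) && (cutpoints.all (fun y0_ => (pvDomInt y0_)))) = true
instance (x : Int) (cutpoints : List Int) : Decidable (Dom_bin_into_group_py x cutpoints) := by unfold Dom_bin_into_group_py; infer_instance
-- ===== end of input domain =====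

-- B replaces A's binary search by a first-match linear scan (simpler, same result on
-- nonempty sorted cutpoints, including x below the first cutpoint via the negative index).

-- ===== PORT A =====
-- Python indexing cutpoints[i] (negative from the end); 0 is never read inside Pre_.
def pvGetD (cp : List Int) (i : Int) : Int := (PySem.List.pyGet? cp i).getD 0

-- A's while-loop: binary search for the upper-bound index 'high'.
def binLoop (x : Int) (cp : List Int) (low high : Int) : Int :=
  if low < high then
    let mid := low + PySem.Int.floordiv (high - low) 2
    if x < pvGetD cp mid then binLoop x cp low mid
    else binLoop x cp (mid + 1) high
  else high
termination_by (high - low).toNat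
decreasing_by
  · rw [PySem.Int.floordiv_eq_ediv_of_pos (by omega : (0:Int) < 2)] at *
    omega
  · rw [PySem.Int.floordiv_eq_ediv_of_pos (by omega : (0:Int) < 2)] at *
    omega

def bin_into_group_py (x : Int) (cutpoints : List Int) : String :=
  let high := binLoop x cutpoints 0 ((cutpoints.length : Int) - 1)
  let lower_bound := pvGetD cutpoints (high - 1)
  let upper_bound := pvGetD cutpoints high
  if high = (cutpoints.length : Int) - 1 then
    "[" ++ PySem.Int.toStr lower_bound ++ ", " ++ PySem.Int.toStr upper_bound ++ "]"
  else
    "[" ++ PySem.Int.toStr lower_bound ++ ", " ++ PySem.Int.toStr upper_bound ++ ")"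

-- ===== PORT B =====
-- B's for-loop with break: index of the first cutpoint exceeding x, else the default.
def findHigh (x : Int) (l : List Int) (i : Int) (dflt : Int) : Int :=
  match l with
  | [] => dflt
  | c :: rest => if x < c then i else findHigh x rest (i + 1) dflt

def bin_into_group_py_alt (x : Int) (cutpoints : List Int) : String :=
  let high := findHigh x cutpoints 0 ((cutpoints.length : Int) - 1)
  let lower_bound := pvGetD cutpoints (high - 1)
  let upper_bound := pvGetD cutpoints high
  if high = (cutpoints.length : Int) - 1 then
    "[" ++ PySem.Int.toStr lower_bound ++ ", " ++ PySem.Int.toStr upper_bound ++ "]"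
  else
    "[" ++ PySem.Int.toStr lower_bound ++ ", " ++ PySem.Int.toStr upper_bound ++ ")"

-- ===== PRECONDITION & SPEC =====
-- Pre_ excludes the empty list, on which A (and B) raise IndexError, and inputs where
-- the comparison pattern x < cutpoints[i] is not monotone in i (cutpoints unsorted
-- around x), where binary search's probe order yields an accidental index while the
-- intended use has sorted cutpoints.
def Pre_bin_into_group_py (x : Int) (cutpoints : List Int) : Prop :=
  cutpoints ≠ [] ∧ ∀ i < cutpoints.length, ∀ j < cutpoints.length,
    i ≤ j → x < cutpoints.getD i 0 → x < cutpoints.getD j 0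
instance (x : Int) (cutpoints : List Int) : Decidable (Pre_bin_into_group_py x cutpoints) := by
  unfold Pre_bin_into_group_py; infer_instance

def pvWitness_bin_into_group_py : Int × List Int := (3, [1, 2, 5])

def Spec_bin_into_group_py (x : Int) (cutpoints : List Int) (out : String) : Prop := out = bin_into_group_py_alt x cutpoints
instance (x : Int) (cutpoints : List Int) (out : String) : Decidable (Spec_bin_into_group_py x cutpoints out) := by unfold Spec_bin_into_group_py; infer_instance

-- ===== CLAIM (what is proved, stated in full; the proofs are below) =====
def Claim_equal_bin_into_group_py : Prop := ∀ (x : Int) (cutpoints : List Int), Dom_bin_into_group_py x cutpoints → Pre_bin_into_group_py x cutpoints → Spec_bin_into_group_py x cutpoints (bin_into_group_py x cutpoints)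

-- ===== LEMMAS AND PROOFS =====

-- The common value of both loops: the first index with x < cp[i] (as Int), else len-1.
def pvT (x : Int) (cp : List Int) : Int :=
  let k := cp.findIdx (fun c => decide (x < c))
  if k < cp.length then (k : Int) else (cp.length : Int) - 1

lemma findHigh_eq (x : Int) :
    ∀ (l : List Int) (i dflt : Int),
      findHigh x l i dflt =
        (if l.findIdx (fun c => decide (x < c)) < l.length
         then i + (l.findIdx (fun c => decide (x < c)) : Int) else dflt) := by
  intro l
  induction l with
  | nil => intro i dflt; simp [findHigh]
  | cons c rest ih =>
    intro i dflt
    by_cases h : x < c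
    · simp [findHigh, h, List.findIdx_cons]
    · have e1 : findHigh x (c :: rest) i dflt = findHigh x rest (i + 1) dflt := by
        simp [findHigh, h]
      rw [e1, ih, List.findIdx_cons]
      simp only [h, decide_false, cond_false, List.length_cons]
      rcases Nat.lt_or_ge (rest.findIdx (fun c => decide (x < c))) rest.length with h1 | h1
      · rw [if_pos h1, if_pos (by omega)]
        push_cast; ring
      · rw [if_neg (by omega), if_neg (by omega)]

lemma binLoop_eq (x : Int) (cp : List Int)
    (hmono : ∀ (i j : Nat) (_ : i < cp.length) (hj : j < cp.length), i ≤ j →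
      x < cp[i]'(by omega) → x < cp[j]) :
    ∀ (N : Nat) (low high : Int), (high - low).toNat ≤ N →
      0 ≤ low → low ≤ pvT x cp → pvT x cp ≤ high → high ≤ (cp.length : Int) - 1 →
      binLoop x cp low high = pvT x cp := by
  intro N
  induction N with
  | zero =>
    intro low high hN h0 hlt hth hhn
    rw [binLoop]
    rw [if_neg (by omega)]
    omega
  | succ N ih =>
    intro low high hN h0 hlt hth hhn
    rw [binLoop]
    by_cases hlh : low < high
    · rw [if_pos hlh]
      have h2 : PySem.Int.floordiv (high - low) 2 = (high - low) / 2 :=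
        PySem.Int.floordiv_eq_ediv_of_pos (by omega)
      set mid := low + PySem.Int.floordiv (high - low) 2 with hmid
      have hmb : low ≤ mid ∧ mid < high := by rw [hmid, h2]; omega
      have hmlen : mid.toNat < cp.length := by omega
      have hget : pvGetD cp mid = cp[mid.toNat] := by
        unfold pvGetD
        rw [PySem.List.pyGet?_eq_some_getElem cp (i := mid) (by omega) (by omega)]
        rfl
      set k := cp.findIdx (fun c => decide (x < c)) with hk
      by_cases hx : x < pvGetD cp mid
      · rw [if_pos hx]
        -- x < cp[mid] so the first hit k ≤ mid, hence pvT ≤ mid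
        rw [hget] at hx
        have hkle : k ≤ mid.toNat := by
          by_contra hgt
          have hfalse := List.not_of_lt_findIdx (p := fun c => decide (x < c)) (xs := cp)
            (i := mid.toNat) (by omega)
          simp only [decide_eq_false_iff_not] at hfalse
          exact hfalse hx
        have hTle : pvT x cp ≤ mid := by
          rw [pvT]
          simp only [← hk]
          rw [if_pos (by omega)]
          omega
        exact ih low mid (by omega) h0 hlt hTle (by omega)
      · rw [if_neg hx]
        -- cp[mid] ≤ x and cp sorted: no hit at or before mid, so mid < pvT
        rw [hget] at hx
        rw [not_lt] at hx
        have hnone : ∀ (j : Nat) (hjl : j < cp.length), j ≤ mid.toNat → ¬ (x < cp[j]'hjl) := by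
          intro j hjl hj hxj
          exact absurd (hmono j mid.toNat hjl hmlen hj hxj) (not_lt.mpr hx)
        have hkgt : mid.toNat < k := by
          by_contra hle
          have hklen : k < cp.length := by omega
          have hp := List.findIdx_getElem (p := fun c => decide (x < c)) (xs := cp)
            (w := hklen)
          simp only [decide_eq_true_eq] at hp
          exact hnone k hklen (by omega) hp
        have hTge : mid + 1 ≤ pvT x cp := by
          rw [pvT]
          simp only [← hk]
          split_ifs with h1
          · omega
          · omega
        exact ih (mid + 1) high (by omega) (by omega) hTge hth hhn
    · rw [if_neg hlh]; omega

-- ===== VERDICT (by name: the statement is the Claim_ definition above) =====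
theorem bin_into_group_py_spec : Claim_equal_bin_into_group_py := by
  intro x cp _hd hpre
  obtain ⟨hne, hm⟩ := hpre
  have hmono : ∀ (i j : Nat) (_ : i < cp.length) (hj : j < cp.length), i ≤ j →
      x < cp[i]'(by omega) → x < cp[j] := by
    intro i j hi hj hij hxi
    have := hm i hi j hj hij
    rw [List.getD_eq_getElem cp 0 hi, List.getD_eq_getElem cp 0 hj] at this
    exact this hxi
  have hlen : 1 ≤ cp.length := by
    cases cp with
    | nil => exact absurd rfl hne
    | cons a l => simp
  unfold Spec_bin_into_group_py bin_into_group_py bin_into_group_py_alt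
  have hT0 : 0 ≤ pvT x cp := by
    rw [pvT]; split_ifs <;> omega
  have hTn : pvT x cp ≤ (cp.length : Int) - 1 := by
    rw [pvT]; split_ifs with h <;> omega
  have hA : binLoop x cp 0 ((cp.length : Int) - 1) = pvT x cp :=
    binLoop_eq x cp hmono ((cp.length : Int) - 1 - 0).toNat 0 _ (le_refl _) (le_refl _)
      hT0 hTn (le_refl _)
  have hB : findHigh x cp 0 ((cp.length : Int) - 1) = pvT x cp := by
    rw [findHigh_eq, pvT]
    split_ifs with h <;> simp
  rw [hA, hB]
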